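-- pv_equiv track=rewrite | github.com/NycolasR/Atividade-Xadrez | alcance_da_rainha.py | selecionar_coordenadas_diagonais
-- ===== SOURCE A (Python) =====
-- def selecionar_coordenadas_rainha(tab):
--     '''
--     (matriz) -> int, int
--     Retorna as coordenadas (i, j) da rainha na
--     matriz do tabuleiro.
--     '''
--
--     i_queen = j_queen = 0
--
--     for i in range(len(tab)):
--         for j in range(len(tab[0])):
--             if (tab[i][j]).strip() == 'R':
--                 i_queen, j_queen = i, j
--     return i_queen, j_queen
--
-- def selecionar_coordenadas_diagonais(tab):
--     '''
--     (matriz) -> int, int, int, int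
--     Com base nas coordenadas da rainha,
--     serão retornadas as coordenadas de origem das
--     diagonais descrescente e crescente, respectivamente
--     (i, j), (i, j).
--     '''
--
--     i_queen, j_queen = selecionar_coordenadas_rainha(tab)
--
--     #diagonal descendente
--     i_diag_desc = j_diag_desc = 0
--     while i_queen > 0 and j_queen > 0 :
--         i_queen -= 1
--         j_queen -= 1
--
--     #atribuindo coordenadas
--     i_diag_desc, j_diag_desc = i_queen, j_queen
--
--
--     i_queen, j_queen = selecionar_coordenadas_rainha(tab)
--
--     #diagonal ascendente
--     i_diag_asce = j_diag_asce = 0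
--     while i_queen < len(tab)-1 and j_queen > 0:
--         i_queen += 1
--         j_queen -= 1
--
--     #atribuindo coordenadas
--     i_diag_asce, j_diag_asce = i_queen, j_queen
--
--     return i_diag_desc, j_diag_desc, i_diag_asce, j_diag_asce
-- ===== SOURCE B (Python) =====
-- def _posicao_rainha(tab):
--     # Scan backwards (bottom-right within the first-row width) and return the
--     # first hit, i.e. the last 'R' in row-major order; (0, 0) if absent.
--     w = len(tab[0])
--     for i in reversed(range(len(tab))):
--         row = tab[i]
--         for j in reversed(range(w)):
--             if row[j].strip() == 'R':
--                 return i, j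
--     return 0, 0
--
--
-- def selecionar_coordenadas_diagonais(tab):
--     if not tab:
--         return 0, 0, 0, 0
--     i_queen, j_queen = _posicao_rainha(tab)
--     d = min(i_queen, j_queen)
--     s = min(len(tab) - 1 - i_queen, j_queen)
--     return i_queen - d, j_queen - d, i_queen + s, j_queen - s
-- ===== Notes on version B (the rewrite author's own statement) =====
-- stated objective: simpler
-- what changed: B replaces A's two diagonal while-loops with closed-form arithmetic (d = min(i,j); s = min(len(tab)-1-i, j)) and finds the queen by a reverse scan that early-returns the first hit instead of A's full forward scan keeping the last hit.
import Mathlib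
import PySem

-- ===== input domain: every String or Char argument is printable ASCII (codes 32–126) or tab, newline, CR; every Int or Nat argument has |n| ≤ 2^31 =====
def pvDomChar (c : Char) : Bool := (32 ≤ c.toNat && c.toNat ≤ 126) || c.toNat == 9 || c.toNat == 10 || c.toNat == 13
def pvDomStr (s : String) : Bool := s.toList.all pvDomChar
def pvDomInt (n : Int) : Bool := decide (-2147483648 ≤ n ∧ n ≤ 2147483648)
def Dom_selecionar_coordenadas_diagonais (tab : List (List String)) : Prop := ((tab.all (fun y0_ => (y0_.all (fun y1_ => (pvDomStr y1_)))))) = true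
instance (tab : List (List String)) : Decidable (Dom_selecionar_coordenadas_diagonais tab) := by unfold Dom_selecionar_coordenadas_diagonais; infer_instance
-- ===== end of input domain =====

-- B replaces A's two diagonal while-loops with closed-form min-arithmetic and locates the
-- queen by a reverse scan returning the first hit (= A's last row-major hit); objective: simpler.

-- ===== PORT A =====
-- selecionar_coordenadas_rainha: forward double loop keeping the LAST match
def pvRainhaA (tab : List (List String)) : Int × Int :=
  (PySem.List.pyRange 0 (tab.length : Int) 1).foldl (fun st i =>
    (PySem.List.pyRange 0 ((PySem.List.pyGetD tab 0 []).length : Int) 1).foldl (fun st j =>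
      if PySem.Str.strip (PySem.List.pyGetD (PySem.List.pyGetD tab i []) j "") = "R"
      then (i, j) else st) st)
    ((0 : Int), (0 : Int))

-- while i_queen > 0 and j_queen > 0: i -= 1; j -= 1
def pvDescLoopA (i j : Int) : Int × Int :=
  if i > 0 ∧ j > 0 then pvDescLoopA (i - 1) (j - 1) else (i, j)
termination_by i.toNat
decreasing_by omega

-- while i_queen < len(tab)-1 and j_queen > 0: i += 1; j -= 1
def pvAscLoopA (n i j : Int) : Int × Int :=
  if i < n - 1 ∧ j > 0 then pvAscLoopA n (i + 1) (j - 1) else (i, j)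
termination_by j.toNat
decreasing_by omega

def selecionar_coordenadas_diagonais (tab : List (List String)) : Int × Int × Int × Int :=
  let q := pvRainhaA tab
  let dd := pvDescLoopA q.1 q.2
  let q2 := pvRainhaA tab
  let aa := pvAscLoopA (tab.length : Int) q2.1 q2.2
  (dd.1, dd.2, aa.1, aa.2)

-- ===== PORT B =====
-- inner reversed(range(w)) scan, first hit (argument counts how many indices remain)
def pvRowScanB (row : List String) : Nat → Option Int
  | 0 => none
  | j + 1 =>
      if PySem.Str.strip (PySem.List.pyGetD row (j : Int) "") = "R"
      then some (j : Int) else pvRowScanB row j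

-- outer reversed(range(len(tab))) scan, early return on the first row with a hit
def pvGridScanB (tab : List (List String)) (w : Nat) : Nat → Option (Int × Int)
  | 0 => none
  | i + 1 =>
      match pvRowScanB (PySem.List.pyGetD tab (i : Int) []) w with
      | some j => some ((i : Int), j)
      | none => pvGridScanB tab w i

def selecionar_coordenadas_diagonais_alt (tab : List (List String)) : Int × Int × Int × Int :=
  if tab = [] then (0, 0, 0, 0)
  else
    let q := (pvGridScanB tab (PySem.List.pyGetD tab 0 []).length tab.length).getD (0, 0)
    let d := min q.1 q.2
    let s := min ((tab.length : Int) - 1 - q.1) q.2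
    (q.1 - d, q.2 - d, q.1 + s, q.2 - s)

-- ===== PRECONDITION & SPEC =====
-- Pre_ excludes exactly the ragged boards on which Python A raises IndexError
-- (a row shorter than the first row, which fixes the scanned width).
def Pre_selecionar_coordenadas_diagonais (tab : List (List String)) : Prop :=
  ∀ row ∈ tab, (PySem.List.pyGetD tab 0 []).length ≤ row.length
instance (tab : List (List String)) : Decidable (Pre_selecionar_coordenadas_diagonais tab) := by
  unfold Pre_selecionar_coordenadas_diagonais; infer_instance

def pvWitness_selecionar_coordenadas_diagonais : List (List String) := [[".", "R"], [".", "."]]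

def Spec_selecionar_coordenadas_diagonais (tab : List (List String)) (out : Int × Int × Int × Int) : Prop := out = selecionar_coordenadas_diagonais_alt tab
instance (tab : List (List String)) (out : Int × Int × Int × Int) : Decidable (Spec_selecionar_coordenadas_diagonais tab out) := by unfold Spec_selecionar_coordenadas_diagonais; infer_instance

-- ===== CLAIM (what is proved, stated in full; the proofs are below) =====
def Claim_equal_selecionar_coordenadas_diagonais : Prop := ∀ (tab : List (List String)), Dom_selecionar_coordenadas_diagonais tab → Pre_selecionar_coordenadas_diagonais tab → Spec_selecionar_coordenadas_diagonais tab (selecionar_coordenadas_diagonais tab)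

-- ===== LEMMAS AND PROOFS =====

-- the inner forward fold (last hit wins) equals the reverse scan's first hit
theorem pv_inner_eq (row : List String) (i : Int) :
    ∀ (w : Nat) (st : Int × Int),
      (PySem.List.pyRange 0 (w : Int) 1).foldl (fun st j =>
        if PySem.Str.strip (PySem.List.pyGetD row j "") = "R" then (i, j) else st) st
      = match pvRowScanB row w with
        | some j => (i, j)
        | none => st := by
  intro w
  induction w with
  | zero => intro st; simp [PySem.List.pyRange_one_eq_nil, pvRowScanB]
  | succ w ih =>
      intro st
      have hsplit : PySem.List.pyRange 0 ((w + 1 : Nat) : Int) 1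
          = PySem.List.pyRange 0 (w : Int) 1 ++ [(w : Int)] := by
        push_cast
        exact PySem.List.pyRange_one_succ_right (by positivity)
      rw [hsplit, List.foldl_append]
      simp only [List.foldl_cons, List.foldl_nil]
      rw [ih st]
      simp only [pvRowScanB]
      split_ifs with h <;> rfl

-- the outer forward fold equals the reverse grid scan's first hit
theorem pv_outer_eq (tab : List (List String)) (w : Nat) :
    ∀ (n : Nat) (st : Int × Int),
      (PySem.List.pyRange 0 (n : Int) 1).foldl (fun st i =>
        (PySem.List.pyRange 0 (w : Int) 1).foldl (fun st j =>
          if PySem.Str.strip (PySem.List.pyGetD (PySem.List.pyGetD tab i []) j "") = "R"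
          then (i, j) else st) st) st
      = match pvGridScanB tab w n with
        | some q => q
        | none => st := by
  intro n
  induction n with
  | zero => intro st; simp [PySem.List.pyRange_one_eq_nil, pvGridScanB]
  | succ n ih =>
      intro st
      have hsplit : PySem.List.pyRange 0 ((n + 1 : Nat) : Int) 1
          = PySem.List.pyRange 0 (n : Int) 1 ++ [(n : Int)] := by
        push_cast
        exact PySem.List.pyRange_one_succ_right (by positivity)
      rw [hsplit, List.foldl_append]
      simp only [List.foldl_cons, List.foldl_nil]
      rw [ih st, pv_inner_eq]
      simp only [pvGridScanB]
      cases hr : pvRowScanB (PySem.List.pyGetD tab (n : Int) []) w <;>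
        cases hg : pvGridScanB tab w n <;> simp

theorem pvRowScanB_nonneg (row : List String) :
    ∀ (w : Nat) (j : Int), pvRowScanB row w = some j → 0 ≤ j := by
  intro w
  induction w with
  | zero => intro j h; simp [pvRowScanB] at h
  | succ w ih =>
      intro j h
      simp only [pvRowScanB] at h
      split at h
      · cases h; positivity
      · exact ih j h

theorem pvGridScanB_bounds (tab : List (List String)) (w : Nat) :
    ∀ (n : Nat) (q : Int × Int), pvGridScanB tab w n = some q →
      0 ≤ q.1 ∧ q.1 < (n : Int) ∧ 0 ≤ q.2 := by
  intro n
  induction n with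
  | zero => intro q h; simp [pvGridScanB] at h
  | succ n ih =>
      intro q h
      simp only [pvGridScanB] at h
      split at h
      · next j hj =>
          cases h
          refine ⟨by positivity, by push_cast; omega, pvRowScanB_nonneg _ _ _ hj⟩
      · have := ih q h
        refine ⟨this.1, by push_cast; omega, this.2.2⟩

theorem pvDescLoopA_eq (i j : Int) (hi : 0 ≤ i) (hj : 0 ≤ j) :
    pvDescLoopA i j = (i - min i j, j - min i j) := by
  fun_induction pvDescLoopA i j with
  | case1 i j h ih =>
      rw [ih (by omega) (by omega)]
      simp only [Prod.mk.injEq]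
      omega
  | case2 i j h =>
      simp only [Prod.mk.injEq]
      omega

theorem pvAscLoopA_eq (n i j : Int) (hj : 0 ≤ j) (hi : i ≤ n - 1) :
    pvAscLoopA n i j = (i + min (n - 1 - i) j, j - min (n - 1 - i) j) := by
  fun_induction pvAscLoopA n i j with
  | case1 i j h ih =>
      rw [ih (by omega) (by omega)]
      simp only [Prod.mk.injEq]
      omega
  | case2 i j h =>
      simp only [Prod.mk.injEq]
      omega

theorem pvRainhaA_eq (tab : List (List String)) :
    pvRainhaA tab
      = match pvGridScanB tab (PySem.List.pyGetD tab 0 []).length tab.length with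
        | some q => q
        | none => ((0 : Int), (0 : Int)) := by
  unfold pvRainhaA
  exact pv_outer_eq tab _ tab.length _

-- ===== VERDICT (by name: the statement is the Claim_ definition above) =====
theorem selecionar_coordenadas_diagonais_spec : Claim_equal_selecionar_coordenadas_diagonais := by
  intro tab _ _
  unfold Spec_selecionar_coordenadas_diagonais
  unfold selecionar_coordenadas_diagonais selecionar_coordenadas_diagonais_alt
  by_cases htab : tab = []
  · subst htab
    simp [pvRainhaA_eq, pvGridScanB, pvDescLoopA, pvAscLoopA]
  · rw [if_neg htab]
    have hn : 1 ≤ tab.length := by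
      cases tab with
      | nil => exact absurd rfl htab
      | cons a l => simp
    rw [pvRainhaA_eq]
    cases hg : pvGridScanB tab (PySem.List.pyGetD tab 0 []).length tab.length with
    | none =>
        simp only [Option.getD_none]
        rw [pvDescLoopA_eq 0 0 le_rfl le_rfl,
            pvAscLoopA_eq (tab.length : Int) 0 0 le_rfl (by omega)]
    | some q =>
        obtain ⟨h1, h2, h3⟩ := pvGridScanB_bounds tab _ tab.length q hg
        simp only [Option.getD_some]
        rw [pvDescLoopA_eq q.1 q.2 h1 h3,
            pvAscLoopA_eq (tab.length : Int) q.1 q.2 h3 (by omega)]
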